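-- pv_equiv track=rewrite | github.com/ajithkumar-natarajan/CSE535-IR | Project-2/SourceCode/inverted_index.py | DAATAnd
-- ===== SOURCE A (Python) =====
-- def DAATAnd(postings):
-- 	daat_and_output = []
-- 	flag = 0
-- 	comparisons = 0
-- 	while flag != 1:
-- 		for i in postings:
-- 			if not i:
-- 				flag = 1
-- 				break
--
-- 		if flag != 1:
-- 			min_val, min_index = find_min(postings)
-- 			match_count = 0
-- 			for i in range(len(postings)):
-- 				if min_val != postings[i][0] and i != min_index:
-- 					comparisons = comparisons+1
-- 				elif i != min_index:
-- 					comparisons = comparisons+1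
--
-- 				if min_val == postings[i][0]:
-- 					match_count = match_count + 1
-- 			if match_count == len(postings):
-- 				daat_and_output.append(min_val)
--
-- 			for to_del in range(len(postings)):
-- 				if postings[to_del][0] == min_val:
-- 					del postings[to_del][0]
--
-- 	return daat_and_output, comparisons
--
-- def find_min(input_list):
-- 	m = input_list[0][0]
-- 	index = 0
-- 	for i in range(len(input_list)):
-- 		if m > input_list[i][0]:
-- 			m = input_list[i][0]
-- 			index = i
-- 	return m, index
-- ===== SOURCE B (Python) =====
-- def DAATAnd(postings):
--     # Pointer-based re-implementation: never mutates the input lists (A destroys them).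
--     k = len(postings)
--     ptrs = [0] * k
--     out = []
--     comparisons = 0
--     while all(p < len(l) for p, l in zip(ptrs, postings)):
--         m = min(l[p] for p, l in zip(ptrs, postings))
--         comparisons += k - 1
--         if all(l[p] == m for p, l in zip(ptrs, postings)):
--             out.append(m)
--         ptrs = [p + 1 if l[p] == m else p for p, l in zip(ptrs, postings)]
--     return out, comparisons
-- ===== Notes on version B (the rewrite author's own statement) =====
-- stated objective: alternative
-- what changed: B replaces A's destructive per-round head deletion, index-tracking find_min and per-element comparison/match-count loops with immutable index pointers advanced over zip(ptrs, postings), the builtins min/all, and a closed-form comparisons increment of k-1 per round; the input lists are never mutated.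
import Mathlib
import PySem

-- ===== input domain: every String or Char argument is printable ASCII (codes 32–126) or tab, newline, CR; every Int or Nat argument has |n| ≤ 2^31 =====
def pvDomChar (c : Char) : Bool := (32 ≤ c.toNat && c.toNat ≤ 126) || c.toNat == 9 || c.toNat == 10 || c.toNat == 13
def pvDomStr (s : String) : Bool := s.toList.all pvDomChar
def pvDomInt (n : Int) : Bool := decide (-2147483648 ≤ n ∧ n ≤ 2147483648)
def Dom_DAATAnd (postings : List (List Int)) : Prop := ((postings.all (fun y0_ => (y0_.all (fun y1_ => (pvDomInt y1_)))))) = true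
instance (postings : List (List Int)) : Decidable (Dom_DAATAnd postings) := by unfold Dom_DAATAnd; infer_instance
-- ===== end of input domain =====

-- B re-implements A's round loop with immutable index pointers, builtin min/all and a closed-form
-- comparisons increment instead of A's destructive head deletion and per-element counting loops;
-- equivalence is about the RETURN value only (A empties the input lists in place, B never mutates them).

-- ===== PORT A =====
-- find_min: m = input_list[0][0] (Python raises IndexError on an empty outer list — only reachable outside Pre_)
def findMinA (input_list : List (List Int)) : Int × Int :=
  (List.range input_list.length).foldl
    (fun (mi : Int × Int) i =>
      if mi.1 > (input_list.getD i []).headD 0 then ((input_list.getD i []).headD 0, (i : Int)) else mi)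
    ((input_list.headD []).headD 0, 0)

-- the while-loop of A; fuel only makes the recursion total (one round removes ≥ 1 element, so
-- (total length + 1) rounds always suffice on inputs where Python returns)
def loopA (fuel : Nat) (postings : List (List Int)) (daat_and_output : List Int) (comparisons : Int) :
    List Int × Int :=
  match fuel with
  | 0 => (daat_and_output, comparisons)
  | fuel + 1 =>
    if postings.any List.isEmpty then (daat_and_output, comparisons)   -- flag = 1
    else if postings.isEmpty then (daat_and_output, comparisons)       -- Python: find_min raises IndexError here (outside Pre_)
    else
      let mv := findMinA postings
      -- the single Python for-loop updating `comparisons` and `match_count` together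
      let cm := (List.range postings.length).foldl
        (fun (cm : Int × Int) i =>
          ((if mv.1 ≠ (postings.getD i []).headD 0 ∧ (i : Int) ≠ mv.2 then cm.1 + 1
            else if (i : Int) ≠ mv.2 then cm.1 + 1 else cm.1),
           (if mv.1 = (postings.getD i []).headD 0 then cm.2 + 1 else cm.2)))
        (comparisons, (0 : Int))
      let out' := if cm.2 = (postings.length : Int) then daat_and_output ++ [mv.1] else daat_and_output
      -- 'for to_del in range(len(postings)): if postings[to_del][0] == min_val: del postings[to_del][0]'
      let postings' := postings.map (fun l => if l.headD 0 = mv.1 then l.tail else l)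
      loopA fuel postings' out' cm.1

def DAATAnd (postings : List (List Int)) : List Int × Int :=
  loopA ((postings.map List.length).sum + 1) postings [] 0

-- ===== PORT B =====
def loopB (fuel : Nat) (postings : List (List Int)) (ptrs : List Nat) (out : List Int) (comparisons : Int) :
    List Int × Int :=
  match fuel with
  | 0 => (out, comparisons)
  | fuel + 1 =>
    if (ptrs.zip postings).all (fun pl => pl.1 < pl.2.length) then
      match PySem.List.min? ((ptrs.zip postings).map (fun pl => pl.2.getD pl.1 0)) (fun x => x) with
      | none => (out, comparisons)   -- Python: min() of an empty sequence raises ValueError (postings = [], outside Pre_)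
      | some m =>
        let comparisons' := comparisons + ((postings.length : Int) - 1)
        let out' := if (ptrs.zip postings).all (fun pl => pl.2.getD pl.1 0 = m) then out ++ [m] else out
        loopB fuel postings
          ((ptrs.zip postings).map (fun pl => if pl.2.getD pl.1 0 = m then pl.1 + 1 else pl.1))
          out' comparisons'
    else (out, comparisons)

def DAATAnd_alt (postings : List (List Int)) : List Int × Int :=
  loopB ((postings.map List.length).sum + 1) postings (List.replicate postings.length 0) [] 0

-- ===== PRECONDITION & SPEC =====
-- Pre_ excludes only the empty outer list, on which Python A raises IndexError (and B raises ValueError).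
def Pre_DAATAnd (postings : List (List Int)) : Prop := postings ≠ []
instance (postings : List (List Int)) : Decidable (Pre_DAATAnd postings) := by unfold Pre_DAATAnd; infer_instance
def pvWitness_DAATAnd : List (List Int) := [[1, 2, 4], [2, 4]]

def Spec_DAATAnd (postings : List (List Int)) (out : List Int × Int) : Prop := out = DAATAnd_alt postings
instance (postings : List (List Int)) (out : List Int × Int) : Decidable (Spec_DAATAnd postings out) := by unfold Spec_DAATAnd; infer_instance

-- ===== CLAIM (what is proved, stated in full; the proofs are below) =====
def Claim_equal_DAATAnd : Prop := ∀ (postings : List (List Int)), Dom_DAATAnd postings → Pre_DAATAnd postings → Spec_DAATAnd postings (DAATAnd postings)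

-- ===== LEMMAS AND PROOFS =====

theorem headD_drop (l : List Int) (n : Nat) : (l.drop n).headD 0 = l.getD n 0 := by
  simp only [List.headD_eq_head?_getD, List.getD_eq_getElem?_getD, ← List.head?_drop]

theorem any_empty_eq_not_all (Z : List (Nat × List Int)) :
    (Z.map (fun pl => pl.2.drop pl.1)).any List.isEmpty = !Z.all (fun pl => pl.1 < pl.2.length) := by
  rw [Bool.eq_iff_iff]
  simp only [List.any_map, Function.comp_def, List.any_eq_true, Bool.not_eq_true',
    List.all_eq_false, List.isEmpty_iff, List.drop_eq_nil_iff]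
  constructor <;> rintro ⟨pl, hm, hc⟩ <;> exact ⟨pl, hm, by simp at hc ⊢; omega⟩

theorem countP_ne (n j : Nat) (h : j < n) :
    (List.range n).countP (fun i : Nat => decide (¬ (i:Int) = (j:Int))) = n - 1 := by
  have h1 : (List.range n).countP (fun i : Nat => decide (¬ (i:Int) = (j:Int)))
      = (List.range n).countP (fun a : Nat => decide (¬ (a == j) = true)) := by
    apply List.countP_congr; intro a _; simp
  have h2 := List.length_eq_countP_add_countP (p := fun i : Nat => i == j) (l := List.range n)
  have h3 : (List.range n).countP (fun i : Nat => i == j) = 1 := by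
    rw [← List.count]
    exact List.count_eq_one_of_mem List.nodup_range (by simp [h])
  simp only [List.length_range] at h2
  omega

theorem countP_eq_iff_all (hs : List Int) (m : Int) :
    ((List.range hs.length).countP (fun i : Nat => decide (m = hs.getD i 0)) = hs.length)
      ↔ (hs.all (fun h => decide (h = m))) = true := by
  have key := List.countP_eq_length (p := fun i : Nat => decide (m = hs.getD i 0)) (l := List.range hs.length)
  rw [List.length_range] at key
  rw [key, List.all_eq_true]
  constructor
  · intro H x hx
    obtain ⟨i, hi, rfl⟩ := List.getElem_of_mem hx
    have := H i (by simpa using hi)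
    rw [List.getD_eq_getElem hs 0 hi] at this
    simpa using (by simpa using this : m = hs[i]).symm
  · intro H i hi
    simp only [List.mem_range] at hi
    have := H (hs.getD i 0) (by rw [List.getD_eq_getElem hs 0 hi]; exact List.getElem_mem hi)
    simpa using (by simpa using this : hs.getD i 0 = m).symm

theorem minfold_aux (hs : List Int) (n : Nat) (hn : n ≤ hs.length) :
    (((List.range n).foldl (fun (mi : Int × Int) i => if mi.1 > hs.getD i 0 then (hs.getD i 0, (i:Int)) else mi) (hs.headD 0, 0)).1
      = (hs.take n).foldl min (hs.headD 0))
    ∧ ∃ j, (j = 0 ∨ j < n) ∧ (((List.range n).foldl (fun (mi : Int × Int) i => if mi.1 > hs.getD i 0 then (hs.getD i 0, (i:Int)) else mi) (hs.headD 0, 0)).2 = (j : Int)) := by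
  induction n with
  | zero => exact ⟨by simp, 0, Or.inl rfl, by simp⟩
  | succ n ih =>
    obtain ⟨hf, j, hj, hsnd⟩ := ih (by omega)
    have hlt : n < hs.length := hn
    rw [List.range_succ, List.foldl_append, List.foldl_cons, List.foldl_nil]
    rw [List.take_add_one, List.getElem?_eq_getElem hlt, List.foldl_append, Option.toList_some,
      List.foldl_cons, List.foldl_nil]
    rw [List.getD_eq_getElem hs 0 hlt]
    constructor
    · by_cases hc : (((List.range n).foldl (fun (mi : Int × Int) i => if mi.1 > hs.getD i 0 then (hs.getD i 0, (i:Int)) else mi) (hs.headD 0, 0)).1) > hs[n]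
      · rw [if_pos hc]
        rw [hf] at hc
        exact (min_eq_right hc.le).symm
      · rw [if_neg hc]
        rw [not_lt] at hc
        rw [hf] at hc ⊢
        exact (min_eq_left hc).symm
    · split_ifs with hc
      · exact ⟨n, Or.inr (by omega), rfl⟩
      · exact ⟨j, by rcases hj with h | h; exact Or.inl h; exact Or.inr (by omega), hsnd⟩

theorem min?_eq_foldl (hs : List Int) (hne : hs ≠ []) :
    PySem.List.min? hs (fun x => x) = some (hs.foldl min (hs.headD 0)) := by
  cases hs with
  | nil => exact absurd rfl hne
  | cons x t => rw [PySem.List.min?_id_cons]; simp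

theorem access_eq (Z : List (Nat × List Int)) (i : Nat) :
    ((Z.map (fun pl => pl.2.drop pl.1)).getD i []).headD 0
      = (Z.map (fun pl => pl.2.getD pl.1 0)).getD i 0 := by
  induction Z generalizing i with
  | nil => simp
  | cons z t ih =>
    cases i with
    | zero => simp
    | succ i => simpa using ih i

theorem zip_map_fst_zip (f : Nat × List Int → Nat) :
    ∀ (ptrs : List Nat) (P : List (List Int)),
      (((ptrs.zip P).map f).zip P) = (ptrs.zip P).map (fun pl => (f pl, pl.2)) := by
  intro ptrs
  induction ptrs with
  | nil => intro P; rfl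
  | cons p pt ih =>
    intro P
    cases P with
    | nil => rfl
    | cons q qt => simp [List.zip_cons_cons, ih]

theorem init_headD (Z : List (Nat × List Int)) (h : Z ≠ []) :
    ((Z.map (fun pl => pl.2.drop pl.1)).headD []).headD 0
      = (Z.map (fun pl => pl.2.getD pl.1 0)).headD 0 := by
  cases Z with
  | nil => exact absurd rfl h
  | cons z t => simp

theorem next_eq (Z : List (Nat × List Int)) (ptrs : List Nat) (P : List (List Int))
    (hZ : Z = ptrs.zip P) (M : Int) :
    (Z.map (fun pl => pl.2.drop pl.1)).map (fun l => if l.headD 0 = M then l.tail else l)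
      = ((Z.map (fun pl => if pl.2.getD pl.1 0 = M then pl.1 + 1 else pl.1)).zip P).map
          (fun pl => pl.2.drop pl.1) := by
  subst hZ
  rw [zip_map_fst_zip, List.map_map, List.map_map]
  apply List.map_congr_left
  intro pl _
  simp only [Function.comp_def]
  rw [headD_drop]
  split_ifs with hc
  · exact List.tail_drop
  · rfl

theorem loop_agree : ∀ (fuel : Nat) (ptrs : List Nat) (P : List (List Int)) (out : List Int) (comps : Int),
    ptrs.length = P.length →
    loopA fuel ((ptrs.zip P).map (fun pl => pl.2.drop pl.1)) out comps = loopB fuel P ptrs out comps := by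
  intro fuel
  induction fuel with
  | zero => intro ptrs P out comps _; rfl
  | succ fuel ih =>
    intro ptrs P out comps hlen
    by_cases hP : P = []
    · subst hP
      have hp : ptrs = [] := List.eq_nil_of_length_eq_zero (by simpa using hlen)
      subst hp
      simp [loopA, loopB, PySem.List.min?]
    · -- main branch: P ≠ []
      have hZlen : (ptrs.zip P).length = P.length := by
        rw [List.length_zip, hlen, min_self]
      have hZne : ptrs.zip P ≠ [] := by
        intro h
        apply hP
        have h0 := congrArg List.length h
        rw [hZlen] at h0
        exact List.eq_nil_of_length_eq_zero h0
      set Z := ptrs.zip P with hZ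
      set cur := Z.map (fun pl => pl.2.drop pl.1) with hcurdef
      set hs := Z.map (fun pl => pl.2.getD pl.1 0) with hhsdef
      have hcur_ne : cur ≠ [] := by simpa [hcurdef, List.map_eq_nil_iff] using hZne
      have hhs_ne : hs ≠ [] := by simpa [hhsdef, List.map_eq_nil_iff] using hZne
      have hhs_len : hs.length = P.length := by simp [hhsdef, hZlen]
      have hcur_len : cur.length = P.length := by simp [hcurdef, hZlen]
      have hacc : ∀ i, (cur.getD i []).headD 0 = hs.getD i 0 := access_eq Z
      -- the minimum and find_min
      obtain ⟨hfst, j, hj, hsnd⟩ := minfold_aux hs hs.length le_rfl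
      rw [List.take_length] at hfst
      have hjlt : j < hs.length := by
        rcases hj with h | h
        · rw [h]; exact List.length_pos_of_ne_nil hhs_ne
        · exact h
      have hmv : findMinA cur = (hs.foldl min (hs.headD 0), (j : Int)) := by
        unfold findMinA
        have hFeq : (fun (mi : Int × Int) i =>
              if mi.1 > (cur.getD i []).headD 0 then ((cur.getD i []).headD 0, (i:Int)) else mi)
            = (fun (mi : Int × Int) i =>
              if mi.1 > hs.getD i 0 then (hs.getD i 0, (i:Int)) else mi) := by
          funext mi i; rw [hacc i]
        rw [hFeq, init_headD Z hZne, show cur.length = hs.length from by rw [hcur_len, hhs_len]]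
        exact Prod.ext hfst hsnd
      set M := hs.foldl min (hs.headD 0) with hMdef
      have hany : cur.any List.isEmpty = !Z.all (fun pl => pl.1 < pl.2.length) := by
        rw [hcurdef]; exact any_empty_eq_not_all Z
      by_cases hg : Z.all (fun pl => decide (pl.1 < pl.2.length)) = true
      · -- every pointer in range: one real round on both sides
        simp only [loopA, loopB]
        rw [hany, hg, min?_eq_foldl hs hhs_ne]
        have hcure : cur.isEmpty = false := by
          simp [hcur_ne]
        simp only [Bool.not_true, Bool.false_eq_true, if_false, hcure, if_true]
        rw [hmv]
        dsimp only
        rw [← hZ, ← hMdef]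
        have hCM : (List.foldl
              (fun (cm : Int × Int) (i : Nat) =>
                (if M ≠ (cur.getD i []).headD 0 ∧ (i:Int) ≠ (j:Int) then cm.1 + 1
                  else if (i:Int) ≠ (j:Int) then cm.1 + 1 else cm.1,
                 if M = (cur.getD i []).headD 0 then cm.2 + 1 else cm.2))
              (comps, 0) (List.range cur.length))
            = (comps + ((cur.length - 1 : Nat) : Int),
               (0 : Int) + ((List.range cur.length).countP (fun i : Nat => decide (M = hs.getD i 0)) : Int)) := by
          have hfun : (fun (cm : Int × Int) (i : Nat) =>
                (if M ≠ (cur.getD i []).headD 0 ∧ (i:Int) ≠ (j:Int) then cm.1 + 1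
                  else if (i:Int) ≠ (j:Int) then cm.1 + 1 else cm.1,
                 if M = (cur.getD i []).headD 0 then cm.2 + 1 else cm.2))
              = (fun (cm : Int × Int) (i : Nat) =>
                ((fun (c : Int) (i : Nat) => if ¬ (i:Int) = (j:Int) then c + 1 else c) cm.1 i,
                 (fun (c : Int) (i : Nat) => if M = hs.getD i 0 then c + 1 else c) cm.2 i)) := by
            funext cm i
            rw [hacc i]
            by_cases h1 : (i:Int) = (j:Int) <;> by_cases h2 : M = hs.getD i 0 <;> simp [h1, h2]
          rw [hfun, PySem.List.foldl_prod_mk (f := fun (c : Int) (i : Nat) => if ¬ (i:Int) = (j:Int) then c + 1 else c) (g := fun (c : Int) (i : Nat) => if M = hs.getD i 0 then c + 1 else c)]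
          rw [PySem.List.foldl_ite_add_one (p := fun i : Nat => ¬ (i:Int) = (j:Int)),
            PySem.List.foldl_ite_add_one (p := fun i : Nat => M = hs.getD i 0)]
          rw [countP_ne cur.length j (by rw [hcur_len, ← hhs_len]; exact hjlt)]
        rw [hCM]
        dsimp only
        have hcomps : comps + ((cur.length - 1 : Nat) : Int) = comps + ((P.length : Int) - 1) := by
          have h1 : 0 < P.length := List.length_pos_of_ne_nil hP
          rw [hcur_len]; omega
        rw [hcomps]
        have hcondIff : ((0:Int) + ((List.range cur.length).countP (fun i : Nat => decide (M = hs.getD i 0)) : Int) = (cur.length : Int))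
            ↔ ((Z.all fun pl => decide (pl.2.getD pl.1 0 = M)) = true) := by
          have hle : cur.length = hs.length := by rw [hcur_len, hhs_len]
          rw [hle, zero_add, Nat.cast_inj, countP_eq_iff_all hs M, hhsdef, List.all_map]
          exact Iff.rfl
        rw [if_congr hcondIff rfl rfl]
        have hnext : List.map (fun l => if l.headD 0 = M then l.tail else l) cur
            = ((Z.map (fun pl => if pl.2.getD pl.1 0 = M then pl.1 + 1 else pl.1)).zip P).map
                (fun pl => pl.2.drop pl.1) := by
          rw [hcurdef]; exact next_eq Z ptrs P hZ M
        rw [hnext]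
        exact ih (Z.map (fun pl => if pl.2.getD pl.1 0 = M then pl.1 + 1 else pl.1)) P _ _
          (by rw [List.length_map, hZlen])
      · -- some list exhausted: both sides stop
        have hgf : Z.all (fun pl => decide (pl.1 < pl.2.length)) = false := by
          revert hg; cases Z.all (fun pl => decide (pl.1 < pl.2.length)) <;> simp
        simp only [loopA, loopB]
        rw [hany, ← hZ, hgf]
        simp


theorem cur_replicate_zero (P : List (List Int)) :
    ((List.replicate P.length 0).zip P).map (fun pl : Nat × List Int => pl.2.drop pl.1) = P := by
  induction P with
  | nil => rfl
  | cons x t ih => simpa [List.replicate_succ] using ih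

-- ===== VERDICT (by name: the statement is the Claim_ definition above) =====
theorem DAATAnd_spec : Claim_equal_DAATAnd := by
  intro postings _ _
  unfold Spec_DAATAnd DAATAnd DAATAnd_alt
  rw [← loop_agree _ _ _ _ _ (List.length_replicate), cur_replicate_zero]
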